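-- pv_equiv track=rewrite | github.com/uewekenuewe/everybody.codes | 2024/quest2/q2.py | checkLineBin
-- ===== SOURCE A (Python) =====
-- def checkLineBin(line,word,loop=False):
--     result = [0 for _ in line]
--     if loop == False:
--         for i in range(len(line)-len(word)+1):
--             if line[i:i+len(word)] == word:
--                 for j in range(i,i+len(word)):
--                     result[j] = 1
--     else:
--         for i in range(len(line)-len(word)+1):
--             if line[i:i+len(word)] == word:
--                 for j in range(i,i+len(word)):
--                     result[j] = 1
--         for i in range(len(line)-len(word)+1,len(line)):
--             ll = abs(len(line[i:])-len(word))
--             if line[i:] + line[:ll] == word: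
--                 for x in range(ll):
--                     result[x] = 1
--                 for x in range(i,len(result)):
--                     result[x] = 1
--
--     return result
-- ===== SOURCE B (Python) =====
-- def checkLineBin(line, word, loop=False):
--     n, m = len(line), len(word)
--     text = line + (line[:m - 1] if loop else "")
--     starts = [i for i in range(len(text) - m + 1) if text[i:i + m] == word]
--     covered = {j % n for s in starts for j in range(s, s + m)}
--     return [1 if j in covered else 0 for j in range(n)]
-- ===== Notes on version B (the rewrite author's own statement) =====
-- stated objective: simpler
-- what changed: Instead of A's two separate branch loops that write 1s in place (with special wrap arithmetic 'll' and a second marking pass for circular matches), B appends the first m-1 characters to the line, finds all occurrence starts in that doubled text with one uniform scan, and emits the indicator of the covered positions taken modulo len(line).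
import Mathlib
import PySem

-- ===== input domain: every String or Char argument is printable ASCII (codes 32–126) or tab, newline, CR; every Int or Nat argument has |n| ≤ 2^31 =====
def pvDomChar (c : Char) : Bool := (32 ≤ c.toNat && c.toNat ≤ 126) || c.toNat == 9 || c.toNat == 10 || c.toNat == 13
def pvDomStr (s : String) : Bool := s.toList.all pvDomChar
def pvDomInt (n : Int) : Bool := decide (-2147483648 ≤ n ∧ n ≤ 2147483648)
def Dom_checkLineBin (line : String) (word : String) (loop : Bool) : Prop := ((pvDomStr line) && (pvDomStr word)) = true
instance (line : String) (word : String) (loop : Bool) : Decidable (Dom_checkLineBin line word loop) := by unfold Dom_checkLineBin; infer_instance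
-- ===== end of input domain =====

-- B replaces A's two marking loops (with separate wrap arithmetic) by one uniform scan of the
-- line extended by its first m-1 characters, marking covered positions modulo the line length;
-- objective: simpler. A and B agree on every input (no precondition).


-- ===== PORT A =====
def checkLineBin (line : String) (word : String) (loop : Bool) : List Int :=
  let cs := line.toList
  let ws := word.toList
  let result : List Int := cs.map (fun _ => (0 : Int))
  if loop = false then
    (PySem.List.pyRange 0 ((cs.length : Int) - (ws.length : Int) + 1) 1).foldl
      (fun result i =>
        if PySem.List.slice cs (some i) (some (i + (ws.length : Int))) = ws then
          (PySem.List.pyRange i (i + (ws.length : Int)) 1).foldl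
            (fun r j => PySem.List.pySetD r j 1) result
        else result) result
  else
    let result :=
      (PySem.List.pyRange 0 ((cs.length : Int) - (ws.length : Int) + 1) 1).foldl
        (fun result i =>
          if PySem.List.slice cs (some i) (some (i + (ws.length : Int))) = ws then
            (PySem.List.pyRange i (i + (ws.length : Int)) 1).foldl
              (fun r j => PySem.List.pySetD r j 1) result
          else result) result
    (PySem.List.pyRange ((cs.length : Int) - (ws.length : Int) + 1) (cs.length : Int) 1).foldl
      (fun result i =>
        let tl := PySem.List.slice cs (some i) none
        let ll : Int := |(tl.length : Int) - (ws.length : Int)|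
        if tl ++ PySem.List.slice cs none (some ll) = ws then
          let r1 := (PySem.List.pyRange 0 ll 1).foldl
              (fun r x => PySem.List.pySetD r x 1) result
          (PySem.List.pyRange i ((r1.length : Int)) 1).foldl
            (fun r x => PySem.List.pySetD r x 1) r1
        else result) result

-- ===== PORT B =====
def checkLineBin_alt (line : String) (word : String) (loop : Bool) : List Int :=
  let cs := line.toList
  let ws := word.toList
  let n := cs.length
  let m := ws.length
  let text := cs ++ (if loop then PySem.List.slice cs none (some ((m : Int) - 1)) else [])
  let starts := (PySem.List.pyRange 0 ((text.length : Int) - (m : Int) + 1) 1).filter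
      (fun i => PySem.List.slice text (some i) (some (i + (m : Int))) == ws)
  let covered : PySem.Set Int := PySem.Set.ofList
      (starts.flatMap (fun s =>
        (PySem.List.pyRange s (s + (m : Int)) 1).map (fun j => PySem.Int.mod j (n : Int))))
  (PySem.List.pyRange 0 (n : Int) 1).map (fun j => if j ∈ covered then (1 : Int) else 0)

-- ===== PRECONDITION & SPEC =====
def Spec_checkLineBin (line : String) (word : String) (loop : Bool) (out : List Int) : Prop := out = checkLineBin_alt line word loop
instance (line : String) (word : String) (loop : Bool) (out : List Int) : Decidable (Spec_checkLineBin line word loop out) := by unfold Spec_checkLineBin; infer_instance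

-- ===== CLAIM (what is proved, stated in full; the proofs are below) =====
def Claim_equal_checkLineBin : Prop := ∀ (line : String) (word : String) (loop : Bool), Dom_checkLineBin line word loop → Spec_checkLineBin line word loop (checkLineBin line word loop)

-- ===== LEMMAS AND PROOFS =====

lemma pvFoldSet_length (L : List Int) (res : List Int) :
    (L.foldl (fun r j => PySem.List.pySetD r j 1) res).length = res.length := by
  induction L generalizing res with
  | nil => rfl
  | cons a t ih => simp [List.foldl_cons, ih, PySem.List.length_pySetD]

lemma pvMark_getD (d : Nat) : ∀ (a b : Int), (b - a).toNat = d → 0 ≤ a →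
    ∀ (res : List Int) (k : Nat), k < res.length →
    ((PySem.List.pyRange a b 1).foldl (fun r j => PySem.List.pySetD r j 1) res).getD k 0
      = if a ≤ (k : Int) ∧ (k : Int) < b then 1 else res.getD k 0 := by
  induction d with
  | zero =>
    intro a b hd ha res k hk
    rw [PySem.List.pyRange_one_eq_nil (by omega)]
    simp only [List.foldl_nil]
    rw [if_neg (by omega)]
  | succ n ih =>
    intro a b hd ha res k hk
    rw [PySem.List.pyRange_one_cons (by omega)]
    simp only [List.foldl_cons]
    rw [ih (a+1) b (by omega) (by omega) _ k (by rw [PySem.List.length_pySetD]; exact hk)]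
    rw [PySem.List.pySetD_of_nonneg res 1 ha]
    rcases Nat.lt_or_ge k a.toNat with h | h
    · rw [if_neg (by omega), if_neg (by omega), List.getD_eq_getElem?_getD,
        List.getElem?_set_ne (by omega), ← List.getD_eq_getElem?_getD]
    · rcases Nat.eq_or_lt_of_le h with h' | h'
      · rw [if_neg (by omega), if_pos (by omega), List.getD_eq_getElem?_getD, ← h',
          List.getElem?_set_self (by omega)]
        simp
      · by_cases hb : (k : Int) < b
        · rw [if_pos (by omega), if_pos (by omega)]
        · rw [if_neg (by omega), if_neg (by omega), List.getD_eq_getElem?_getD,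
            List.getElem?_set_ne (by omega), ← List.getD_eq_getElem?_getD]

lemma pvMarkFull_getD (a : Int) (ha : a < 0) (res : List Int) (k : Nat) (hk : k < res.length) :
    ((PySem.List.pyRange a ((res.length : Nat) : Int) 1).foldl
      (fun r j => PySem.List.pySetD r j 1) res).getD k 0 = 1 := by
  rw [PySem.List.pyRange_one_append a 0 _ (by omega) (by omega), List.foldl_append]
  rw [pvMark_getD ((((res.length : Nat) : Int) - 0).toNat) 0 _ rfl le_rfl _ k
    (by rw [pvFoldSet_length]; exact hk)]
  rw [if_pos (by constructor <;> omega)]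

lemma pvSteps_length {f : List Int → Int → List Int} :
    ∀ (L : List Int) (res : List Int),
    (∀ res i, i ∈ L → (f res i).length = res.length) →
    (L.foldl f res).length = res.length := by
  intro L
  induction L with
  | nil => intro res _; rfl
  | cons a t ih =>
    intro res h
    simp only [List.foldl_cons]
    rw [ih _ (fun r i hi => h r i (List.mem_cons_of_mem _ hi)), h res a List.mem_cons_self]

lemma pvSteps_getD {f : List Int → Int → List Int} {C : Int → Nat → Bool} :
    ∀ (L : List Int) (res : List Int) (k : Nat), k < res.length →
    (∀ res i, i ∈ L → (f res i).length = res.length) →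
    (∀ (res : List Int) (i : Int) (k : Nat), i ∈ L → k < res.length →
        (f res i).getD k 0 = if C i k then 1 else res.getD k 0) →
    (L.foldl f res).getD k 0 = if L.any (fun i => C i k) then 1 else res.getD k 0 := by
  intro L
  induction L with
  | nil => intro res k hk _ _; simp
  | cons a t ih =>
    intro res k hk hlen hget
    simp only [List.foldl_cons]
    rw [ih (f res a) k (by rw [hlen res a List.mem_cons_self]; exact hk)
        (fun r i hi => hlen r i (List.mem_cons_of_mem _ hi))
        (fun r i k' hi hk' => hget r i k' (List.mem_cons_of_mem _ hi) hk'),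
      hget res a k List.mem_cons_self hk]
    by_cases h1 : t.any (fun i => C i k) = true <;> by_cases h2 : C a k = true <;>
      simp [List.any_cons, h1, h2]

def pvCA1 (cs ws : List Char) (i : Int) (k : Nat) : Bool :=
  decide (PySem.List.slice cs (some i) (some (i + (ws.length : Int))) = ws
    ∧ i ≤ (k : Int) ∧ (k : Int) < i + (ws.length : Int))

def pvLL (cs ws : List Char) (i : Int) : Int :=
  |(((PySem.List.slice cs (some i) none).length : Int) - (ws.length : Int))|

def pvCA2 (cs ws : List Char) (i : Int) (k : Nat) : Bool :=
  decide ((PySem.List.slice cs (some i) none ++ PySem.List.slice cs none (some (pvLL cs ws i)) = ws) ∧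
    (i < 0 ∨ (k : Int) < pvLL cs ws i ∨ i ≤ (k : Int)))

lemma pvZeros_getD (cs : List Char) (k : Nat) :
    ((cs.map (fun _ => (0 : Int))).getD k 0) = 0 := by
  rw [List.getD_eq_getElem?_getD, List.getElem?_map]
  cases cs[k]? <;> simp

lemma pvStep1_len (cs ws : List Char) (r : List Int) (i : Int) :
    (if PySem.List.slice cs (some i) (some (i + (ws.length : Int))) = ws then
          (PySem.List.pyRange i (i + (ws.length : Int)) 1).foldl
            (fun r j => PySem.List.pySetD r j 1) r
        else r).length = r.length := by
  by_cases h : PySem.List.slice cs (some i) (some (i + (ws.length : Int))) = ws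
  · rw [if_pos h]; exact pvFoldSet_length _ r
  · rw [if_neg h]

lemma pvFold1_getD (cs ws : List Char) (res : List Int) (k : Nat) (hk : k < res.length) :
    ((PySem.List.pyRange 0 ((cs.length : Int) - (ws.length : Int) + 1) 1).foldl
      (fun (result : List Int) (i : Int) =>
        if PySem.List.slice cs (some i) (some (i + (ws.length : Int))) = ws then
          (PySem.List.pyRange i (i + (ws.length : Int)) 1).foldl
            (fun r j => PySem.List.pySetD r j 1) result
        else result) res).getD k 0
    = if (PySem.List.pyRange 0 ((cs.length : Int) - (ws.length : Int) + 1) 1).any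
          (fun i => pvCA1 cs ws i k)
      then 1 else res.getD k 0 := by
  apply pvSteps_getD _ res k hk
  · intro r i _; exact pvStep1_len cs ws r i
  · intro r i k' hi hk'
    have hi0 : 0 ≤ i := ((PySem.List.mem_pyRange_one).1 hi).1
    by_cases hc : PySem.List.slice cs (some i) (some (i + (ws.length : Int))) = ws
    · simp only [hc, if_true]
      rw [pvMark_getD ((i + (ws.length : Int) - i).toNat) i _ rfl hi0 r k' hk']
      by_cases h1 : i ≤ (k' : Int) ∧ (k' : Int) < i + (ws.length : Int)
      · rw [if_pos h1, if_pos (show pvCA1 cs ws i k' = true by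
          unfold pvCA1; rw [decide_eq_true_iff]; exact ⟨hc, h1.1, h1.2⟩)]
      · rw [if_neg h1, if_neg (show ¬ pvCA1 cs ws i k' = true by
          unfold pvCA1; rw [decide_eq_true_iff]; intro h; exact h1 ⟨h.2.1, h.2.2⟩)]
    · simp only [hc, if_false]
      rw [if_neg (show ¬ pvCA1 cs ws i k' = true by
        unfold pvCA1; rw [decide_eq_true_iff]; intro h; exact hc h.1)]

lemma pvStep2_len (cs ws : List Char) (r : List Int) (i : Int) :
    (if PySem.List.slice cs (some i) none ++
          PySem.List.slice cs none (some (pvLL cs ws i)) = ws then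
        (PySem.List.pyRange i
            (((((PySem.List.pyRange 0 (pvLL cs ws i) 1).foldl
                (fun r x => PySem.List.pySetD r x 1) r).length : Nat) : Int)) 1).foldl
          (fun r x => PySem.List.pySetD r x 1)
          ((PySem.List.pyRange 0 (pvLL cs ws i) 1).foldl
            (fun r x => PySem.List.pySetD r x 1) r)
      else r).length = r.length := by
  by_cases h : PySem.List.slice cs (some i) none ++
      PySem.List.slice cs none (some (pvLL cs ws i)) = ws
  · rw [if_pos h, pvFoldSet_length, pvFoldSet_length]
  · rw [if_neg h]

lemma pvFold2_getD (cs ws : List Char)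
    (res : List Int) (k : Nat) (hk : k < res.length) :
    ((PySem.List.pyRange ((cs.length : Int) - (ws.length : Int) + 1) (cs.length : Int) 1).foldl
      (fun (result : List Int) (i : Int) =>
        if PySem.List.slice cs (some i) none ++
            PySem.List.slice cs none (some (pvLL cs ws i)) = ws then
          (PySem.List.pyRange i
              (((((PySem.List.pyRange 0 (pvLL cs ws i) 1).foldl
                  (fun r x => PySem.List.pySetD r x 1) result).length : Nat) : Int)) 1).foldl
            (fun r x => PySem.List.pySetD r x 1)
            ((PySem.List.pyRange 0 (pvLL cs ws i) 1).foldl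
              (fun r x => PySem.List.pySetD r x 1) result)
        else result) res).getD k 0
    = if (PySem.List.pyRange ((cs.length : Int) - (ws.length : Int) + 1) (cs.length : Int) 1).any
          (fun i => pvCA2 cs ws i k)
      then 1 else res.getD k 0 := by
  apply pvSteps_getD _ res k hk
  · intro r i _; exact pvStep2_len cs ws r i
  · intro r i k' hi hk'
    by_cases hc : PySem.List.slice cs (some i) none ++
        PySem.List.slice cs none (some (pvLL cs ws i)) = ws
    · rw [if_pos hc]
      by_cases hi0 : 0 ≤ i
      case neg =>
        rw [pvMarkFull_getD i (by omega) _ k' (by rw [pvFoldSet_length]; exact hk')]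
        rw [if_pos (show pvCA2 cs ws i k' = true by
          unfold pvCA2; rw [decide_eq_true_iff]; exact ⟨hc, Or.inl (by omega)⟩)]
      rw [pvMark_getD ((((((PySem.List.pyRange 0 (pvLL cs ws i) 1).foldl
            (fun r x => PySem.List.pySetD r x 1) r).length : Nat) : Int) - i).toNat) i _ rfl hi0 _ k'
            (by rw [pvFoldSet_length]; exact hk')]
      rw [pvMark_getD ((pvLL cs ws i - 0).toNat) 0 _ rfl le_rfl r k' hk']
      rw [pvFoldSet_length]
      simp only [pvCA2, decide_eq_true_eq, hc, true_and]
      have hk'' : (k' : Int) < (r.length : Int) := by exact_mod_cast hk'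
      split_ifs <;> omega
    · rw [if_neg hc, if_neg (by simp [pvCA2, hc])]

lemma pvA_length (line word : String) (loop : Bool) :
    (checkLineBin line word loop).length = line.toList.length := by
  cases loop
  · exact (pvSteps_length _ _ (fun r i _ => pvStep1_len line.toList word.toList r i)).trans
      (List.length_map ..)
  · exact (pvSteps_length _ _ (fun r i _ => pvStep2_len line.toList word.toList r i)).trans
      ((pvSteps_length _ _ (fun r i _ => pvStep1_len line.toList word.toList r i)).trans
        (List.length_map ..))

lemma pvA_getD_false (line word : String) (k : Nat) (hk : k < line.toList.length) :
    (checkLineBin line word false).getD k 0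
      = if (PySem.List.pyRange 0 ((line.toList.length : Int) - (word.toList.length : Int) + 1) 1).any
            (fun i => pvCA1 line.toList word.toList i k) then 1 else 0 :=
  (pvFold1_getD line.toList word.toList _ k (by simpa using hk)).trans
    (by rw [pvZeros_getD])

lemma pvA_getD_true (line word : String) (k : Nat) (hk : k < line.toList.length) :
    (checkLineBin line word true).getD k 0
      = if (PySem.List.pyRange ((line.toList.length : Int) - (word.toList.length : Int) + 1)
              (line.toList.length : Int) 1).any
            (fun i => pvCA2 line.toList word.toList i k) then 1
        else if (PySem.List.pyRange 0 ((line.toList.length : Int) - (word.toList.length : Int) + 1) 1).any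
            (fun i => pvCA1 line.toList word.toList i k) then 1 else 0 := by
  have hlen1 : ((PySem.List.pyRange 0 ((line.toList.length : Int) - (word.toList.length : Int) + 1) 1).foldl
      (fun (result : List Int) (i : Int) =>
        if PySem.List.slice line.toList (some i) (some (i + (word.toList.length : Int))) = word.toList then
          (PySem.List.pyRange i (i + (word.toList.length : Int)) 1).foldl
            (fun r j => PySem.List.pySetD r j 1) result
        else result) (line.toList.map (fun _ => (0:Int)))).length = line.toList.length :=
    (pvSteps_length _ _ (fun r i _ => pvStep1_len line.toList word.toList r i)).trans
      (List.length_map ..)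
  exact (pvFold2_getD line.toList word.toList _ k (by rw [hlen1]; exact hk)).trans
    (by rw [pvFold1_getD line.toList word.toList _ k (by simpa using hk), pvZeros_getD])

lemma pvGetD_map_pyRange0 (f : Int → Int) (n k : Nat) (hk : k < n) :
    ((PySem.List.pyRange 0 (n : Int) 1).map f).getD k 0 = f (k : Int) := by
  rw [List.getD_eq_getElem?_getD, List.getElem?_map, PySem.List.getElem?_pyRange_one]
  simp [hk]

def pvCovered (line word : String) (loop : Bool) : List Int :=
  PySem.Set.ofList
    ((((PySem.List.pyRange 0
        (((((line.toList ++ (if loop then PySem.List.slice line.toList none (some ((word.toList.length : Int) - 1)) else [])).length : Nat) : Int) - (word.toList.length : Int) + 1)) 1).filter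
      (fun i => PySem.List.slice
          (line.toList ++ (if loop then PySem.List.slice line.toList none (some ((word.toList.length : Int) - 1)) else []))
          (some i) (some (i + (word.toList.length : Int))) == word.toList)).flatMap
      (fun s => (PySem.List.pyRange s (s + (word.toList.length : Int)) 1).map
        (fun j => PySem.Int.mod j (line.toList.length : Int)))))

lemma pvB_length (line word : String) (loop : Bool) :
    (checkLineBin_alt line word loop).length = line.toList.length := by
  unfold checkLineBin_alt
  rw [List.length_map, PySem.List.length_pyRange_one]
  omega

lemma pvB_getD (line word : String) (loop : Bool) (k : Nat) (hk : k < line.toList.length) :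
    (checkLineBin_alt line word loop).getD k 0
      = if (k : Int) ∈ pvCovered line word loop then 1 else 0 :=
  pvGetD_map_pyRange0 _ _ k hk

lemma pvCovered_mem (line word : String) (loop : Bool) (k : Nat) :
    ((k : Int) ∈ pvCovered line word loop)
      ↔ ∃ s : Int, (0 ≤ s ∧
            s < (((line.toList ++ (if loop then PySem.List.slice line.toList none (some ((word.toList.length : Int) - 1)) else [])).length : Int) - (word.toList.length : Int) + 1)) ∧
          PySem.List.slice
              (line.toList ++ (if loop then PySem.List.slice line.toList none (some ((word.toList.length : Int) - 1)) else []))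
              (some s) (some (s + (word.toList.length : Int))) = word.toList ∧
          ∃ j : Int, (s ≤ j ∧ j < s + (word.toList.length : Int)) ∧
            PySem.Int.mod j (line.toList.length : Int) = (k : Int) := by
  unfold pvCovered
  rw [PySem.Set.mem_ofList, List.mem_flatMap]
  constructor
  · rintro ⟨s, hs, hj⟩
    rw [List.mem_filter] at hs
    rw [List.mem_map] at hj
    obtain ⟨j, hj1, hj2⟩ := hj
    rw [PySem.List.mem_pyRange_one] at hj1
    exact ⟨s, (PySem.List.mem_pyRange_one).1 hs.1 |>.imp id id |>.imp_left id |> fun h => h, by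
      exact of_decide_eq_true (by simpa using hs.2), j, hj1, hj2⟩
  · rintro ⟨s, hs, hcond, j, hj1, hj2⟩
    refine ⟨s, List.mem_filter.2 ⟨(PySem.List.mem_pyRange_one).2 hs, by simpa using hcond⟩,
      List.mem_map.2 ⟨j, (PySem.List.mem_pyRange_one).2 hj1, hj2⟩⟩
lemma pvMod_small (j n : Int) (h0 : 0 ≤ j) (h1 : j < n) : PySem.Int.mod j n = j := by
  rw [PySem.Int.mod_eq_emod_of_pos (by omega)]; exact Int.emod_eq_of_lt h0 h1
lemma pvMod_shift (j n : Int) (h0 : n ≤ j) (h1 : j < 2 * n) : PySem.Int.mod j n = j - n := by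
  rw [PySem.Int.mod_eq_emod_of_pos (by omega), ← Int.sub_emod_right j n]
  exact Int.emod_eq_of_lt (by omega) (by omega)
lemma pvSliceText1 (cs ext : List Char) (m : Nat) (i : Int) (hi : 0 ≤ i)
    (him : i + m ≤ cs.length) :
    PySem.List.slice (cs ++ ext) (some i) (some (i + (m : Int)))
      = PySem.List.slice cs (some i) (some (i + (m : Int))) := by
  rw [PySem.List.slice_toNat _ hi (by omega), PySem.List.slice_toNat _ hi (by omega)]
  have h1 : (i + (m : Int)).toNat - i.toNat = m := by omega
  rw [h1, List.drop_append_of_le_length (by omega),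
    List.take_append_of_le_length (by simp [List.length_drop]; omega)]
lemma pvSliceText2 (cs : List Char) (m : Nat) (i : Int) (hm : 1 ≤ m) (hmn : m ≤ cs.length)
    (hi1 : (cs.length : Int) - m + 1 ≤ i) (hi2 : i < cs.length) :
    PySem.List.slice (cs ++ cs.take (m - 1)) (some i) (some (i + (m : Int)))
      = cs.drop i.toNat ++ cs.take (m - (cs.length - i.toNat)) := by
  have hi : 0 ≤ i := by omega
  rw [PySem.List.slice_toNat _ hi (by omega)]
  have h1 : (i + (m : Int)).toNat - i.toNat = m := by omega
  rw [h1, List.drop_append_of_le_length (by omega), List.take_append, List.take_take,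
    List.take_of_length_le (by simp [List.length_drop]; omega)]
  congr 1
  simp only [List.length_drop]
  congr 1
  omega

lemma pvLL_eq (cs ws : List Char) (i : Int)
    (hmn : ws.length ≤ cs.length)
    (hi1 : (cs.length : Int) - (ws.length : Int) + 1 ≤ i) (hi2 : i < (cs.length : Int)) :
    pvLL cs ws i = ((ws.length - (cs.length - i.toNat) : Nat) : Int) := by
  unfold pvLL
  rw [PySem.List.slice_from _ (by omega)]
  simp only [List.length_drop]
  rw [abs_of_nonpos (by omega)]
  omega

lemma pvCond2_eq (cs ws : List Char) (i : Int)
    (hmn : ws.length ≤ cs.length)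
    (hi1 : (cs.length : Int) - (ws.length : Int) + 1 ≤ i) (hi2 : i < (cs.length : Int)) :
    PySem.List.slice cs (some i) none ++ PySem.List.slice cs none (some (pvLL cs ws i))
      = cs.drop i.toNat ++ cs.take (ws.length - (cs.length - i.toNat)) := by
  rw [PySem.List.slice_from _ (by omega), pvLL_eq cs ws i hmn hi1 hi2,
    PySem.List.slice_to_natCast]

lemma pvIff_false (line word : String) (k : Nat) (hk : k < line.toList.length) :
    ((PySem.List.pyRange 0 ((line.toList.length : Int) - (word.toList.length : Int) + 1) 1).any
        (fun i => pvCA1 line.toList word.toList i k) = true)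
    ↔ (k : Int) ∈ pvCovered line word false := by
  rw [pvCovered_mem, List.any_eq_true]
  simp only [Bool.false_eq_true, if_false, List.append_nil]
  constructor
  · rintro ⟨i, hi, hci⟩
    rw [PySem.List.mem_pyRange_one] at hi
    unfold pvCA1 at hci
    rw [decide_eq_true_iff] at hci
    obtain ⟨hc, hk1, hk2⟩ := hci
    exact ⟨i, ⟨hi.1, hi.2⟩, hc, (k : Int), ⟨hk1, hk2⟩,
      pvMod_small _ _ (by omega) (by omega)⟩
  · rintro ⟨s, ⟨hs0, hs1⟩, hcond, j, ⟨hj0, hj1⟩, hj2⟩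
    rw [pvMod_small j _ (by omega) (by omega)] at hj2
    refine ⟨s, (PySem.List.mem_pyRange_one).2 ⟨hs0, hs1⟩, ?_⟩
    unfold pvCA1
    rw [decide_eq_true_iff]
    exact ⟨hcond, by omega, by omega⟩

lemma pvIff_true (line word : String) (hm : 1 ≤ word.toList.length)
    (hmn : word.toList.length ≤ line.toList.length) (k : Nat) (hk : k < line.toList.length) :
    (((PySem.List.pyRange ((line.toList.length : Int) - (word.toList.length : Int) + 1)
          (line.toList.length : Int) 1).any
        (fun i => pvCA2 line.toList word.toList i k) = true) ∨
     ((PySem.List.pyRange 0 ((line.toList.length : Int) - (word.toList.length : Int) + 1) 1).any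
        (fun i => pvCA1 line.toList word.toList i k) = true))
    ↔ (k : Int) ∈ pvCovered line word true := by
  have hext : PySem.List.slice line.toList none (some ((word.toList.length : Int) - 1))
      = line.toList.take (word.toList.length - 1) := by
    rw [show ((word.toList.length : Int) - 1) = (((word.toList.length - 1 : Nat)) : Int) by omega,
      PySem.List.slice_to_natCast]
  rw [pvCovered_mem]
  simp only [if_true, hext]
  have hb : (((line.toList ++ line.toList.take (word.toList.length - 1)).length : Int)
      - (word.toList.length : Int) + 1) = (line.toList.length : Int) := by
    simp only [List.length_append, List.length_take]
    omega
  rw [hb]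
  constructor
  · rintro (h2 | h1)
    · obtain ⟨i, hi, hci⟩ := List.any_eq_true.1 h2
      rw [PySem.List.mem_pyRange_one] at hi
      unfold pvCA2 at hci
      rw [decide_eq_true_iff] at hci
      obtain ⟨hcond, hdisj⟩ := hci
      rw [pvCond2_eq line.toList word.toList i hmn hi.1 hi.2] at hcond
      rw [pvLL_eq line.toList word.toList i hmn hi.1 hi.2] at hdisj
      refine ⟨i, ⟨by omega, by omega⟩, ?_, ?_⟩
      · rw [pvSliceText2 line.toList word.toList.length i hm hmn hi.1 hi.2]
        exact hcond
      · by_cases hik : i ≤ (k : Int)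
        · exact ⟨(k : Int), ⟨hik, by omega⟩, pvMod_small _ _ (by omega) (by omega)⟩
        · have hlt : (k : Int) < ((word.toList.length - (line.toList.length - i.toNat) : Nat) : Int) := by
            rcases hdisj with h | h | h
            · omega
            · exact h
            · omega
          refine ⟨(k : Int) + (line.toList.length : Int), ⟨by omega, by omega⟩, ?_⟩
          rw [pvMod_shift _ _ (by omega) (by omega)]
          omega
    · obtain ⟨i, hi, hci⟩ := List.any_eq_true.1 h1
      rw [PySem.List.mem_pyRange_one] at hi
      unfold pvCA1 at hci
      rw [decide_eq_true_iff] at hci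
      obtain ⟨hc, hk1, hk2⟩ := hci
      refine ⟨i, ⟨hi.1, by omega⟩, ?_, (k : Int), ⟨hk1, hk2⟩,
        pvMod_small _ _ (by omega) (by omega)⟩
      rw [pvSliceText1 line.toList _ word.toList.length i hi.1 (by omega)]
      exact hc
  · rintro ⟨s, ⟨hs0, hs1⟩, hcond, j, ⟨hj0, hj1⟩, hjmod⟩
    by_cases hcase : s + (word.toList.length : Int) ≤ (line.toList.length : Int)
    · refine Or.inr (List.any_eq_true.2 ⟨s, (PySem.List.mem_pyRange_one).2 ⟨hs0, by omega⟩, ?_⟩)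
      rw [pvSliceText1 line.toList _ word.toList.length s hs0 (by omega)] at hcond
      rw [pvMod_small j _ (by omega) (by omega)] at hjmod
      unfold pvCA1
      rw [decide_eq_true_iff]
      exact ⟨hcond, by omega, by omega⟩
    · refine Or.inl (List.any_eq_true.2 ⟨s, (PySem.List.mem_pyRange_one).2 ⟨by omega, hs1⟩, ?_⟩)
      rw [pvSliceText2 line.toList word.toList.length s hm hmn (by omega) hs1] at hcond
      unfold pvCA2
      rw [decide_eq_true_iff]
      refine ⟨?_, Or.inr ?_⟩
      · rw [pvCond2_eq line.toList word.toList s hmn (by omega) hs1]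
        exact hcond
      · rw [pvLL_eq line.toList word.toList s hmn (by omega) hs1]
        by_cases hjn : j < (line.toList.length : Int)
        · rw [pvMod_small j _ (by omega) hjn] at hjmod
          right; omega
        · rw [pvMod_shift j _ (by omega) (by omega)] at hjmod
          left; omega

lemma pvLL_eq_big (cs ws : List Char) (i : Int) (hmn : cs.length < ws.length) :
    pvLL cs ws i = ((ws.length - (cs.length - PySem.List.clampIdx cs.length i) : Nat) : Int) := by
  unfold pvLL
  rw [PySem.List.slice_some_none]
  simp only [List.length_drop]
  have := PySem.List.clampIdx_le cs.length i
  rw [abs_of_nonpos (by omega)]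
  omega

lemma pvCond2_eq_big (cs ws : List Char) (i : Int) (hmn : cs.length < ws.length) :
    PySem.List.slice cs (some i) none ++ PySem.List.slice cs none (some (pvLL cs ws i))
      = cs.drop (PySem.List.clampIdx cs.length i)
        ++ cs.take (ws.length - (cs.length - PySem.List.clampIdx cs.length i)) := by
  rw [PySem.List.slice_some_none, pvLL_eq_big cs ws i hmn, PySem.List.slice_to_natCast]

lemma pvSliceText3 (cs : List Char) (m : Nat) (s : Nat) (hmn : cs.length < m)
    (hq : m - (cs.length - s) ≤ cs.length) (hsn : s ≤ cs.length) :
    PySem.List.slice (cs ++ cs) (some (s : Int)) (some ((s : Int) + (m : Int)))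
      = cs.drop s ++ cs.take (m - (cs.length - s)) := by
  rw [PySem.List.slice_toNat _ (by omega) (by omega)]
  have h1 : ((s : Int) + (m : Int)).toNat - (s : Int).toNat = m := by omega
  have h2 : ((s : Int)).toNat = s := by omega
  rw [h1, h2, List.drop_append_of_le_length hsn, List.take_append,
    List.take_of_length_le (by simp only [List.length_drop]; omega)]
  congr 2
  simp only [List.length_drop]

lemma pvIff_big (line word : String)
    (hmn : line.toList.length < word.toList.length) (k : Nat) (hk : k < line.toList.length) :
    (((PySem.List.pyRange ((line.toList.length : Int) - (word.toList.length : Int) + 1)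
          (line.toList.length : Int) 1).any
        (fun i => pvCA2 line.toList word.toList i k) = true) ∨
     ((PySem.List.pyRange 0 ((line.toList.length : Int) - (word.toList.length : Int) + 1) 1).any
        (fun i => pvCA1 line.toList word.toList i k) = true))
    ↔ (k : Int) ∈ pvCovered line word true := by
  have hext : PySem.List.slice line.toList none (some ((word.toList.length : Int) - 1))
      = line.toList := by
    rw [show ((word.toList.length : Int) - 1) = (((word.toList.length - 1 : Nat)) : Int) by omega,
      PySem.List.slice_to_natCast, List.take_of_length_le (by omega)]
  rw [pvCovered_mem]
  simp only [if_true, hext]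
  constructor
  · rintro (h2 | h1)
    · obtain ⟨i, hi, hci⟩ := List.any_eq_true.1 h2
      rw [PySem.List.mem_pyRange_one] at hi
      unfold pvCA2 at hci
      rw [decide_eq_true_iff] at hci
      obtain ⟨hcond, -⟩ := hci
      rw [pvCond2_eq_big line.toList word.toList i hmn] at hcond
      have hsn : PySem.List.clampIdx line.toList.length i ≤ line.toList.length :=
        PySem.List.clampIdx_le _ _
      have hlen := congrArg List.length hcond
      simp only [List.length_append, List.length_drop, List.length_take] at hlen
      have hq : word.toList.length
          - (line.toList.length - PySem.List.clampIdx line.toList.length i)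
          ≤ line.toList.length := by omega
      have hs2n : PySem.List.clampIdx line.toList.length i + word.toList.length
          ≤ 2 * line.toList.length := by omega
      refine ⟨((PySem.List.clampIdx line.toList.length i : Nat) : Int),
        ⟨Int.natCast_nonneg _, by simp only [List.length_append]; push_cast; omega⟩, ?_, ?_⟩
      · rw [pvSliceText3 line.toList word.toList.length _ hmn hq hsn]
        exact hcond
      · by_cases hsk : ((PySem.List.clampIdx line.toList.length i : Nat) : Int) ≤ (k : Int)
        · exact ⟨(k : Int), ⟨hsk, by omega⟩, pvMod_small _ _ (by omega) (by omega)⟩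
        · refine ⟨(k : Int) + (line.toList.length : Int), ⟨by omega, by omega⟩, ?_⟩
          rw [pvMod_shift _ _ (by omega) (by omega)]
          omega
    · rw [PySem.List.pyRange_one_eq_nil (by omega)] at h1
      simp at h1
  · rintro ⟨sI, ⟨hs0, hs1⟩, hcond, j, ⟨hj0, hj1⟩, hjmod⟩
    simp only [List.length_append] at hs1
    have hsn' : sI < (line.toList.length : Int) := by push_cast at hs1; omega
    rw [show sI = ((sI.toNat : Nat) : Int) by omega] at hcond hj0
    have hclamp : PySem.List.clampIdx line.toList.length ((sI.toNat : Nat) : Int) = sI.toNat := by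
      rw [PySem.List.clampIdx_natCast]
      exact Nat.min_eq_left (by omega)
    refine Or.inl (List.any_eq_true.2 ⟨((sI.toNat : Nat) : Int),
      (PySem.List.mem_pyRange_one).2 ⟨by omega, by omega⟩, ?_⟩)
    unfold pvCA2
    rw [decide_eq_true_iff]
    constructor
    · rw [pvCond2_eq_big line.toList word.toList _ hmn, hclamp]
      rw [pvSliceText3 line.toList word.toList.length sI.toNat hmn
        (by push_cast at hs1; omega) (by omega)] at hcond
      exact hcond
    · right
      rw [pvLL_eq_big line.toList word.toList _ hmn, hclamp]
      by_cases hsk : ((sI.toNat : Nat) : Int) ≤ (k : Int)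
      · right; exact hsk
      · left; push_cast at hs1 ⊢; omega

-- ===== VERDICT (by name: the statement is the Claim_ definition above) =====
theorem checkLineBin_spec : Claim_equal_checkLineBin := by
  intro line word loop _
  unfold Spec_checkLineBin
  apply List.ext_getElem
  · rw [pvA_length, pvB_length]
  intro k h1 h2
  have hk : k < line.toList.length := by rw [pvA_length] at h1; exact h1
  rw [← List.getD_eq_getElem (checkLineBin line word loop) 0 h1,
      ← List.getD_eq_getElem (checkLineBin_alt line word loop) 0 h2]
  cases loop
  · rw [pvA_getD_false line word k hk, pvB_getD line word false k hk]
    exact if_congr (pvIff_false line word k hk) rfl rfl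
  · rw [pvA_getD_true line word k hk, pvB_getD line word true k hk]
    by_cases hmn : word.toList.length ≤ line.toList.length
    · by_cases hm0 : word.toList.length = 0
      · have hA2 : (PySem.List.pyRange ((line.toList.length : Int) - (word.toList.length : Int) + 1)
            (line.toList.length : Int) 1).any
            (fun i => pvCA2 line.toList word.toList i k) = false := by
          rw [PySem.List.pyRange_one_eq_nil (by omega)]; rfl
        have hA1 : (PySem.List.pyRange 0 ((line.toList.length : Int) - (word.toList.length : Int) + 1) 1).any
            (fun i => pvCA1 line.toList word.toList i k) = false := by
          rw [List.any_eq_false]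
          intro i _
          simp only [pvCA1, decide_eq_true_eq]
          rintro ⟨_, h1', h2'⟩
          omega
        have hB : ¬ ((k : Int) ∈ pvCovered line word true) := by
          rw [pvCovered_mem]
          rintro ⟨s, _, _, j, ⟨ha, hb⟩, _⟩
          omega
        rw [hA2, hA1, if_neg hB]
        simp
      · have hiff := pvIff_true line word (by omega) hmn k hk
        rcases Bool.eq_false_or_eq_true
          ((PySem.List.pyRange ((line.toList.length : Int) - (word.toList.length : Int) + 1)
              (line.toList.length : Int) 1).any
            (fun i => pvCA2 line.toList word.toList i k)) with hA2 | hA2 <;>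
          rcases Bool.eq_false_or_eq_true
            ((PySem.List.pyRange 0 ((line.toList.length : Int) - (word.toList.length : Int) + 1) 1).any
              (fun i => pvCA1 line.toList word.toList i k)) with hA1 | hA1 <;>
          rw [hA2, hA1] at hiff ⊢ <;>
          first
          | (have hmem := hiff.mp (Or.inl rfl); rw [if_pos hmem]; rfl)
          | (have hmem := hiff.mp (Or.inr rfl); rw [if_pos hmem]; rfl)
          | (have hnm : ¬ ((k : Int) ∈ pvCovered line word true) := fun hmem => by
               rcases hiff.mpr hmem with h | h <;> simp at h
             rw [if_neg hnm]; rfl)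
    · have hiff := pvIff_big line word (by omega) k hk
      rcases Bool.eq_false_or_eq_true
        ((PySem.List.pyRange ((line.toList.length : Int) - (word.toList.length : Int) + 1)
            (line.toList.length : Int) 1).any
          (fun i => pvCA2 line.toList word.toList i k)) with hA2 | hA2 <;>
        rcases Bool.eq_false_or_eq_true
          ((PySem.List.pyRange 0 ((line.toList.length : Int) - (word.toList.length : Int) + 1) 1).any
            (fun i => pvCA1 line.toList word.toList i k)) with hA1 | hA1 <;>
        rw [hA2, hA1] at hiff ⊢ <;>
        first
        | (have hmem := hiff.mp (Or.inl rfl); rw [if_pos hmem]; rfl)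
        | (have hmem := hiff.mp (Or.inr rfl); rw [if_pos hmem]; rfl)
        | (have hnm : ¬ ((k : Int) ∈ pvCovered line word true) := fun hmem => by
             rcases hiff.mpr hmem with h | h <;> simp at h
           rw [if_neg hnm]; rfl)
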